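-- pv_equiv track=rewrite | github.com/ZorAnderius/goitneo-python-hw-3-MCS3 | Task1/main_classes/AddressBook.py | __sorted_users_notes
-- ===== SOURCE A (Python) =====
-- def __sorted_users_notes(users_birthdays_dict, current_day):
--     first_dict = dict()
--     second_dict = dict()
--     for day, values in users_birthdays_dict:
--         if day >= current_day:
--             first_dict[day] = values
--         else:
--             second_dict[day] = values
--     return first_dict | second_dict
-- ===== SOURCE B (Python) =====
-- def __sorted_users_notes(users_birthdays_dict, current_day):
--     # one stable-sort pass: entries with day >= current_day (key False) come first,
--     # then days < current_day, each group in original order; dict() rebuilds the mapping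
--     return dict(sorted(users_birthdays_dict, key=lambda kv: kv[0] < current_day))
-- ===== Notes on version B (the rewrite author's own statement) =====
-- stated objective: idiomatic
-- what changed: Replaces the two-dict bucketing loop plus dict-merge with a single stable sort on the boolean key day < current_day followed by one dict() construction.
import Mathlib
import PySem

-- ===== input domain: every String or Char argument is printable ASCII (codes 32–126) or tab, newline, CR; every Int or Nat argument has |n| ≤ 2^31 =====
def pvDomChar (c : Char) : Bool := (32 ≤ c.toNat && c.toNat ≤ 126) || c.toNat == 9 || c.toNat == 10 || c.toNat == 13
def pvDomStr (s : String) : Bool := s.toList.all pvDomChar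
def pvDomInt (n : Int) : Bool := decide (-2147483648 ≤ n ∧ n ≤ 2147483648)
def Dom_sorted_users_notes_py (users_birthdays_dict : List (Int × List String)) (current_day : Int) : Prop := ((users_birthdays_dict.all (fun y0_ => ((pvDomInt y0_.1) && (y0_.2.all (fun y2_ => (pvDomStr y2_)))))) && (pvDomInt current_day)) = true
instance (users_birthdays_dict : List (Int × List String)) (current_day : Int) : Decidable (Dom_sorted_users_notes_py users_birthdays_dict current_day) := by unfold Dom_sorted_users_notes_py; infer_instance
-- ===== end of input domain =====

-- B replaces A's two-dict bucketing + dict-merge with one stable sort on the boolean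
-- key (day < current_day) followed by a single dict construction (more idiomatic).


-- ===== PORT A =====
-- for day, values in …: if day >= current_day: first_dict[day]=values else second_dict[day]=values;
-- return first_dict | second_dict  (merge = copy of first updated with second's items, exact Python semantics)
def sorted_users_notes_py (users_birthdays_dict : List (Int × List String)) (current_day : Int) : List (Int × List String) :=
  let dicts := users_birthdays_dict.foldl
    (fun (st : PySem.Dict Int (List String) × PySem.Dict Int (List String)) p =>
      if current_day ≤ p.1 then (st.1.insert p.1 p.2, st.2) else (st.1, st.2.insert p.1 p.2))
    (PySem.Dict.empty, PySem.Dict.empty)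
  (dicts.1.update dicts.2.items).items

-- ===== PORT B =====
-- dict(sorted(users_birthdays_dict, key=lambda kv: kv[0] < current_day))
def sorted_users_notes_py_alt (users_birthdays_dict : List (Int × List String)) (current_day : Int) : List (Int × List String) :=
  (PySem.Dict.ofList (PySem.List.sorted users_birthdays_dict (fun kv => decide (kv.1 < current_day)))).items

-- ===== PRECONDITION & SPEC =====
def Spec_sorted_users_notes_py (users_birthdays_dict : List (Int × List String)) (current_day : Int) (out : List (Int × List String)) : Prop := out = sorted_users_notes_py_alt users_birthdays_dict current_day
instance (users_birthdays_dict : List (Int × List String)) (current_day : Int) (out : List (Int × List String)) : Decidable (Spec_sorted_users_notes_py users_birthdays_dict current_day out) := by unfold Spec_sorted_users_notes_py; infer_instance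

-- ===== CLAIM (what is proved, stated in full; the proofs are below) =====
def Claim_equal_sorted_users_notes_py : Prop := ∀ (users_birthdays_dict : List (Int × List String)) (current_day : Int), Dom_sorted_users_notes_py users_birthdays_dict current_day → Spec_sorted_users_notes_py users_birthdays_dict current_day (sorted_users_notes_py users_birthdays_dict current_day)

-- ===== LEMMAS AND PROOFS =====

-- insertBy skips over a prefix it never goes before
theorem pv_insertBy_append {α : Type} (bef : α → α → Bool) (x : α) (A B : List α)
    (hA : ∀ a ∈ A, bef x a = false) :
    PySem.List.insertBy bef x (A ++ B) = A ++ PySem.List.insertBy bef x B := by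
  induction A with
  | nil => simp
  | cons a A ih =>
      have ha := hA a (by simp)
      have step : PySem.List.insertBy bef x (a :: (A ++ B)) = a :: PySem.List.insertBy bef x (A ++ B) := by
        simp [PySem.List.insertBy, ha]
      rw [List.cons_append, step, ih (fun y hy => hA y (by simp [hy]))]
      simp

-- inserting a key-false element in front of an all-key-true list
theorem pv_insertBy_all_true {α : Type} (key : α → Bool) (x : α) (B : List α)
    (hx : key x = false) (hB : ∀ b ∈ B, key b = true) :
    PySem.List.insertBy (fun a b => decide (key a < key b)) x B = x :: B := by
  cases B with
  | nil => simp [PySem.List.insertBy]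
  | cons b B' =>
      have hb := hB b (by simp)
      simp [PySem.List.insertBy, hx, hb, Bool.lt_iff]

-- the insertion-sort fold with a boolean key partitions stably
theorem pv_foldl_insertBy_bool {α : Type} (key : α → Bool) :
    ∀ (u A B : List α), (∀ a ∈ A, key a = false) → (∀ b ∈ B, key b = true) →
    u.foldl (fun acc x => PySem.List.insertBy (fun a b => decide (key a < key b)) x acc) (A ++ B)
      = (A ++ u.filter (fun x => !key x)) ++ (B ++ u.filter key) := by
  intro u
  induction u with
  | nil => intro A B _ _; simp
  | cons x u ih =>
      intro A B hA hB
      by_cases hx : key x = true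
      · have h1 : PySem.List.insertBy (fun a b => decide (key a < key b)) x (A ++ B)
            = (A ++ B) ++ [x] := by
          apply PySem.List.insertBy_of_forall_not_before
          intro y _
          simp [Bool.lt_iff, hx]
        have h2 := ih A (B ++ [x]) hA (by
          intro b hb
          rcases List.mem_append.mp hb with h | h
          · exact hB b h
          · simp at h; simpa [h] using hx)
        simp only [List.foldl_cons, h1]
        rw [show (A ++ B) ++ [x] = A ++ (B ++ [x]) by simp, h2]
        simp [hx]
      · have hx' : key x = false := by simpa using hx
        have h1 : PySem.List.insertBy (fun a b => decide (key a < key b)) x (A ++ B)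
            = (A ++ [x]) ++ B := by
          rw [pv_insertBy_append _ x A B (by intro a ha; simp [Bool.lt_iff, hA a ha])]
          rw [pv_insertBy_all_true key x B hx' hB]
          simp
        have h2 := ih (A ++ [x]) B (by
          intro a ha
          rcases List.mem_append.mp ha with h | h
          · exact hA a h
          · simp at h; simpa [h] using hx') hB
        simp only [List.foldl_cons, h1, h2]
        simp [hx']

-- Python's stable sort on a boolean key = partition
theorem pv_sorted_bool {α : Type} (key : α → Bool) (u : List α) :
    PySem.List.sorted u key = u.filter (fun x => !key x) ++ u.filter key := by
  rw [PySem.List.sorted_eq_foldl_insertBy]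
  simpa using pv_foldl_insertBy_bool key u [] [] (by simp) (by simp)

-- A's bucketing fold, characterised by filters
theorem pv_foldA (c : Int) :
    ∀ (u : List (Int × List String)) (d₁ d₂ : PySem.Dict Int (List String)),
    u.foldl (fun (st : PySem.Dict Int (List String) × PySem.Dict Int (List String)) p =>
        if c ≤ p.1 then (st.1.insert p.1 p.2, st.2) else (st.1, st.2.insert p.1 p.2)) (d₁, d₂)
      = (d₁.update (u.filter (fun p => decide (c ≤ p.1))), d₂.update (u.filter (fun p => decide (p.1 < c)))) := by
  intro u
  induction u with
  | nil => intro d₁ d₂; simp [PySem.Dict.update]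
  | cons p u ih =>
      intro d₁ d₂
      by_cases hp : c ≤ p.1
      · simp only [List.foldl_cons, if_pos hp, ih]
        have h2 : ¬ p.1 < c := by omega
        simp [hp, h2, PySem.Dict.update]
      · simp only [List.foldl_cons, if_neg hp, ih]
        have h2 : p.1 < c := by omega
        simp [hp, h2, PySem.Dict.update]

-- updating a dict whose items split as d.items ++ e.items, never touching d's keys
theorem pv_update_concat {ν : Type} (l : List (Int × ν)) :
    ∀ (d e : PySem.Dict Int ν), (∀ p ∈ l, d.contains p.1 = false) →
    ((PySem.Dict.mk (d.items ++ e.items)).update l).items = d.items ++ (e.update l).items := by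
  induction l with
  | nil => intro d e _; simp [PySem.Dict.update]
  | cons p l ih =>
      intro d e hd
      have hdp : d.contains p.1 = false := hd p (by simp)
      have hmapd : List.map (fun q => if (q.1 == p.1) = true then (p.1, p.2) else q) d.items = d.items := by
        calc List.map (fun q => if (q.1 == p.1) = true then (p.1, p.2) else q) d.items
            = List.map id d.items := by
              apply List.map_congr_left
              intro q hq
              have : (q.1 == p.1) = false := by
                by_contra h
                have hq1 : (q.1 == p.1) = true := by
                  cases hcb : (q.1 == p.1) <;> simp_all
                have : d.contains p.1 = true := by
                  simp only [PySem.Dict.contains, List.any_eq_true]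
                  exact ⟨q, hq, hq1⟩
                simp_all
              simp [this]
          _ = d.items := List.map_id d.items
      have hcont : (PySem.Dict.mk (d.items ++ e.items)).contains p.1 = e.contains p.1 := by
        simp only [PySem.Dict.contains, List.any_append]
        have : d.items.any (fun q => q.1 == p.1) = false := hdp
        simp [this]
      have hstep : (PySem.Dict.mk (d.items ++ e.items)).insert p.1 p.2
          = PySem.Dict.mk (d.items ++ (e.insert p.1 p.2).items) := by
        by_cases hce : e.contains p.1 = true
        · apply PySem.Dict.ext
          rw [PySem.Dict.items_insert_of_contains _ _ (by rw [hcont]; exact hce)]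
          show List.map _ (d.items ++ e.items) = d.items ++ (e.insert p.1 p.2).items
          rw [List.map_append, hmapd, PySem.Dict.items_insert_of_contains _ _ hce]
        · have hce' : e.contains p.1 = false := by simpa using hce
          apply PySem.Dict.ext
          rw [PySem.Dict.items_insert_of_not_contains _ _ (by rw [hcont]; exact hce')]
          show (d.items ++ e.items) ++ [(p.1, p.2)] = d.items ++ (e.insert p.1 p.2).items
          rw [PySem.Dict.items_insert_of_not_contains _ _ hce']
          simp
      simp only [PySem.Dict.update, List.foldl_cons]
      have := ih d (e.insert p.1 p.2) (fun q hq => hd q (by simp [hq]))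
      simp only [PySem.Dict.update] at this
      calc (List.foldl (fun acc q => acc.insert q.1 q.2) ((PySem.Dict.mk (d.items ++ e.items)).insert p.1 p.2) l).items
          = (List.foldl (fun acc q => acc.insert q.1 q.2) (PySem.Dict.mk (d.items ++ (e.insert p.1 p.2).items)) l).items := by rw [hstep]
        _ = d.items ++ (List.foldl (fun acc q => acc.insert q.1 q.2) (e.insert p.1 p.2) l).items := this

-- update with keys fresh to d appends ofList of the update list
theorem pv_update_disjoint {ν : Type} (d : PySem.Dict Int ν) (l : List (Int × ν))
    (hd : ∀ p ∈ l, d.contains p.1 = false) :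
    (d.update l).items = d.items ++ (PySem.Dict.ofList l).items := by
  have hmk : PySem.Dict.mk (d.items ++ (PySem.Dict.empty : PySem.Dict Int ν).items) = d := by
    cases d; simp [PySem.Dict.empty]
  have := pv_update_concat l d PySem.Dict.empty hd
  rw [hmk] at this
  simpa [PySem.Dict.ofList] using this

-- a list with Nodup keys round-trips through dict
theorem pv_ofList_items_of_nodup {ν : Type} (l : List (Int × ν))
    (h : (l.map Prod.fst).Nodup) : (PySem.Dict.ofList l).items = l := by
  have hfresh : ∀ a ∈ l, (PySem.Dict.empty : PySem.Dict Int ν).contains a.1 = false := by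
    intro a _; simp [PySem.Dict.contains, PySem.Dict.empty]
  have := PySem.Dict.items_foldl_insert_fresh l Prod.fst Prod.snd PySem.Dict.empty hfresh h
  simpa [PySem.Dict.ofList, PySem.Dict.update, PySem.Dict.empty] using this

-- membership in the keys of ofList
theorem pv_mem_keys_ofList {ν : Type} (l : List (Int × ν)) (k : Int) :
    k ∈ (PySem.Dict.ofList l).keys ↔ k ∈ l.map Prod.fst := by
  have := PySem.Dict.keys_foldl_insert_key l Prod.fst (fun _ x => x.2) (PySem.Dict.empty : PySem.Dict Int ν)
  simp only [PySem.Dict.ofList, PySem.Dict.update]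
  rw [this]
  rw [PySem.Set.mem_update]
  simp [PySem.Dict.empty, PySem.Dict.keys]

-- contains on ofList of a filtered list
theorem pv_contains_ofList_false {ν : Type} (l : List (Int × ν)) (k : Int)
    (h : k ∉ l.map Prod.fst) : (PySem.Dict.ofList l).contains k = false := by
  rw [PySem.Dict.contains_eq_decide_mem_keys]
  simp [pv_mem_keys_ofList, h]

-- ===== VERDICT (by name: the statement is the Claim_ definition above) =====
theorem sorted_users_notes_py_spec : Claim_equal_sorted_users_notes_py := by
  intro u c _
  unfold Spec_sorted_users_notes_py sorted_users_notes_py sorted_users_notes_py_alt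
  set hi := u.filter (fun p => decide (c ≤ p.1)) with hhi
  set lo := u.filter (fun p => decide (p.1 < c)) with hlo
  -- facts about the two groups' keys
  have hhiK : ∀ k ∈ hi.map Prod.fst, c ≤ k := by
    intro k hk
    rcases List.mem_map.mp hk with ⟨p, hp, rfl⟩
    have := List.of_mem_filter hp
    simpa using this
  have hloK : ∀ k ∈ lo.map Prod.fst, k < c := by
    intro k hk
    rcases List.mem_map.mp hk with ⟨p, hp, rfl⟩
    have := List.of_mem_filter hp
    simpa using this
  have hhiContains : ∀ k : Int, k < c → (PySem.Dict.ofList hi).contains k = false := by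
    intro k hk
    apply pv_contains_ofList_false
    intro hmem
    have := hhiK k hmem
    omega
  -- B's side: sort = hi ++ lo, then one dict pass
  have hsort : PySem.List.sorted u (fun kv => decide (kv.1 < c)) = hi ++ lo := by
    rw [pv_sorted_bool]
    congr 1
    · apply List.filter_congr
      intro p _
      rw [← decide_not]
      exact (decide_eq_decide.mpr (by omega)).symm
  have hB : (PySem.Dict.ofList (PySem.List.sorted u (fun kv => decide (kv.1 < c)))).items
      = (PySem.Dict.ofList hi).items ++ (PySem.Dict.ofList lo).items := by
    rw [hsort]
    have : PySem.Dict.ofList (hi ++ lo) = (PySem.Dict.ofList hi).update lo := by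
      simp [PySem.Dict.ofList, PySem.Dict.update, List.foldl_append]
    rw [this]
    apply pv_update_disjoint
    intro p hp
    exact hhiContains p.1 (hloK p.1 (List.mem_map.mpr ⟨p, hp, rfl⟩))
  -- A's side: two buckets, then merge
  rw [pv_foldA]
  have hA : ((PySem.Dict.ofList hi).update ((PySem.Dict.ofList lo).items)).items
      = (PySem.Dict.ofList hi).items ++ (PySem.Dict.ofList ((PySem.Dict.ofList lo).items)).items := by
    apply pv_update_disjoint
    intro p hp
    have hk : p.1 ∈ (PySem.Dict.ofList lo).keys := by
      simp only [PySem.Dict.keys]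
      exact List.mem_map.mpr ⟨p, hp, rfl⟩
    have : p.1 ∈ lo.map Prod.fst := (pv_mem_keys_ofList lo p.1).mp hk
    exact hhiContains p.1 (hloK p.1 this)
  have hround : (PySem.Dict.ofList ((PySem.Dict.ofList lo).items)).items = (PySem.Dict.ofList lo).items := by
    apply pv_ofList_items_of_nodup
    have := PySem.Dict.nodup_keys_ofList lo
    simpa [PySem.Dict.keys] using this
  simp only [PySem.Dict.ofList] at hA hB hround ⊢
  rw [hA, hround, hB]
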